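-- pv_equiv track=rewrite | github.com/jeffjiang13/Questions | questions/questions.py | find_lists_with_minimum_value
-- ===== SOURCE A (Python) =====
-- def find_lists_with_minimum_value(lists):
--     minimum = min([
--         min(nums)
--         for nums in lists
--     ])
--     return [
--         i
--         for i, nums in enumerate(lists)
--         if minimum in nums
--     ]
-- ===== SOURCE B (Python) =====
-- def find_lists_with_minimum_value(lists):
--     best = None
--     result = []
--     for i, nums in enumerate(lists):
--         m = min(nums)
--         if best is None or m < best:
--             best = m
--             result = [i]
--         elif m == best:
--             result.append(i)
--     return result
-- ===== Notes on version B (the rewrite author's own statement) =====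
-- stated objective: alternative
-- what changed: Single pass maintaining the running minimum and the list of winning indices, instead of first computing all sublist minima, taking the global minimum, and then rescanning every sublist for membership.
-- outside the precondition, e.g. on find_lists_with_minimum_value([]): A raises ValueError, B returns []
import Mathlib
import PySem

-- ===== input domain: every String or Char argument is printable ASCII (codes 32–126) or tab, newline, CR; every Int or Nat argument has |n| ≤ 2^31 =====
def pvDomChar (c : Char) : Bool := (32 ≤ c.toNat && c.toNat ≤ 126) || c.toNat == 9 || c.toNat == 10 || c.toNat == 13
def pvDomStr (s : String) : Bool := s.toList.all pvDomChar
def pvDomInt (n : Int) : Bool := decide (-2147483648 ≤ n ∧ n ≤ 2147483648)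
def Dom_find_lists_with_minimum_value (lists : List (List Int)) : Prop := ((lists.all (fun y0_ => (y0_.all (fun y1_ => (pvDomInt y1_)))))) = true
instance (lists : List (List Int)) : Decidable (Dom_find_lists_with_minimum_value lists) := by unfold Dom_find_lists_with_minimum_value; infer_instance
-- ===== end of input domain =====

-- B replaces A's two passes (compute all minima + global min, then rescan every sublist
-- for membership) by one pass maintaining the running minimum and the winning indices.

-- min(nums): Python raises ValueError on []; the default 0 is never reached inside Pre_.
def pvm (nums : List Int) : Int := (PySem.List.min? nums (fun x => x)).getD 0

-- ===== PORT A =====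
def find_lists_with_minimum_value (lists : List (List Int)) : List Int :=
  match PySem.List.min? (lists.map pvm) (fun x => x) with
  | none => []   -- min([]) raises ValueError; excluded by Pre_
  | some minimum =>
    (PySem.List.enumerate lists).filterMap
      (fun p => if p.2.contains minimum then some p.1 else none)

-- ===== PORT B =====
def pvStep (s : Option Int × List Int) (p : Int × List Int) : Option Int × List Int :=
  let m := pvm p.2
  match s.1 with
  | none => (some m, [p.1])
  | some b =>
    if m < b then (some m, [p.1])
    else if m = b then (s.1, s.2 ++ [p.1])
    else s

def find_lists_with_minimum_value_alt (lists : List (List Int)) : List Int :=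
  ((PySem.List.enumerate lists).foldl pvStep (none, [])).2

-- ===== PRECONDITION & SPEC =====
-- Pre_ excludes exactly the inputs where Python A raises ValueError: the empty outer
-- list and any input with an empty sublist (min([]) raises there).
def Pre_find_lists_with_minimum_value (lists : List (List Int)) : Prop :=
  lists ≠ [] ∧ ∀ nums ∈ lists, nums ≠ []
instance (lists : List (List Int)) : Decidable (Pre_find_lists_with_minimum_value lists) := by
  unfold Pre_find_lists_with_minimum_value; infer_instance

def pvWitness_find_lists_with_minimum_value : List (List Int) := [[1, 2], [0], [0, 3]]

def Spec_find_lists_with_minimum_value (lists : List (List Int)) (out : List Int) : Prop := out = find_lists_with_minimum_value_alt lists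
instance (lists : List (List Int)) (out : List Int) : Decidable (Spec_find_lists_with_minimum_value lists out) := by unfold Spec_find_lists_with_minimum_value; infer_instance

-- ===== CLAIM (what is proved, stated in full; the proofs are below) =====
def Claim_equal_find_lists_with_minimum_value : Prop := ∀ (lists : List (List Int)), Dom_find_lists_with_minimum_value lists → Pre_find_lists_with_minimum_value lists → Spec_find_lists_with_minimum_value lists (find_lists_with_minimum_value lists)

-- ===== LEMMAS AND PROOFS =====

/-- Running minimum of `pvm p.2` over a list of (index, sublist) pairs, seeded with `b`. -/
def pvMinOf (l : List (Int × List Int)) (b : Int) : Int :=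
  l.foldl (fun acc p => min acc (pvm p.2)) b

lemma pvMinOf_le (l : List (Int × List Int)) (b : Int) : pvMinOf l b ≤ b := by
  induction l generalizing b with
  | nil => simp [pvMinOf]
  | cons p t ih =>
    have h := ih (min b (pvm p.2))
    simp only [pvMinOf, List.foldl_cons] at h ⊢
    omega

/-- Characterisation of B's fold once the running minimum is `some b`. -/
lemma pvFold_spec (l : List (Int × List Int)) (b : Int) (r : List Int) :
    l.foldl pvStep (some b, r) =
      (some (pvMinOf l b),
       (if pvMinOf l b < b then [] else r) ++
         l.filterMap (fun p => if pvm p.2 = pvMinOf l b then some p.1 else none)) := by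
  induction l generalizing b r with
  | nil =>
    simp only [List.foldl_nil, List.filterMap_nil, List.append_nil, pvMinOf]
    simp
  | cons p t ih =>
    simp only [List.foldl_cons, List.filterMap_cons]
    rcases lt_trichotomy (pvm p.2) b with h1 | h1 | h1
    · have hs : pvStep (some b, r) p = (some (pvm p.2), [p.1]) := by
        simp [pvStep, h1]
      have hm : pvMinOf (p :: t) b = pvMinOf t (pvm p.2) := by
        simp only [pvMinOf, List.foldl_cons]
        congr 1; omega
      have hle := pvMinOf_le t (pvm p.2)
      rw [hs, ih, hm]
      by_cases h2 : pvm p.2 = pvMinOf t (pvm p.2)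
      · rw [← h2]
        simp [h1]
      · simp [h2, show pvMinOf t (pvm p.2) < pvm p.2 by omega,
              show pvMinOf t (pvm p.2) < b by omega]
    · have hs : pvStep (some b, r) p = (some b, r ++ [p.1]) := by
        simp [pvStep, h1]
      have hm : pvMinOf (p :: t) b = pvMinOf t b := by
        simp only [pvMinOf, List.foldl_cons]
        congr 1; omega
      have hle := pvMinOf_le t b
      rw [hs, ih, hm]
      by_cases h2 : pvMinOf t b < b
      · simp [h2, show ¬ pvm p.2 = pvMinOf t b by omega]
      · have hb : pvMinOf t b = b := by omega
        simp [hb, h1]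
    · have hs : pvStep (some b, r) p = (some b, r) := by
        simp [pvStep, show ¬ pvm p.2 < b by omega, show ¬ pvm p.2 = b by omega]
      have hm : pvMinOf (p :: t) b = pvMinOf t b := by
        simp only [pvMinOf, List.foldl_cons]
        congr 1; omega
      have hle := pvMinOf_le t b
      rw [hs, ih, hm]
      simp [show ¬ pvm p.2 = pvMinOf t b by omega]

/-- The running minimum over enumerate equals the fold of `min` over the mapped minima. -/
lemma pvMinOf_enumerate (t : List (List Int)) (s c : Int) :
    pvMinOf (PySem.List.enumerate t s) c = (t.map pvm).foldl min c := by
  induction t generalizing s c with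
  | nil => simp [pvMinOf, PySem.List.enumerate]
  | cons x xs ih =>
    simp only [PySem.List.enumerate_cons, List.map_cons, List.foldl_cons, pvMinOf] at *
    exact ih (s + 1) (min c (pvm x))

-- ===== VERDICT (by name: the statement is the Claim_ definition above) =====
theorem find_lists_with_minimum_value_spec : Claim_equal_find_lists_with_minimum_value := by
  intro lists _hDom hPre
  obtain ⟨hne, hall⟩ := hPre
  unfold Spec_find_lists_with_minimum_value
  cases lists with
  | nil => exact absurd rfl hne
  | cons x t =>
    -- A's global minimum
    have hmin : PySem.List.min? (pvm x :: t.map pvm) (fun x => x)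
        = some (((t.map pvm)).foldl min (pvm x)) := by
      simp [PySem.List.min?_id_cons]
    set M : Int := (t.map pvm).foldl min (pvm x) with hM
    -- B's result via the fold characterisation
    have hBstep : pvStep (none, ([] : List Int)) (0, x) = (some (pvm x), [0]) := rfl
    have hB : find_lists_with_minimum_value_alt (x :: t)
        = (if pvMinOf (PySem.List.enumerate t 1) (pvm x) < pvm x then [] else [(0 : Int)])
            ++ (PySem.List.enumerate t 1).filterMap
                (fun p => if pvm p.2 = pvMinOf (PySem.List.enumerate t 1) (pvm x)
                          then some p.1 else none) := by
      simp only [find_lists_with_minimum_value_alt, PySem.List.enumerate_cons,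
        List.foldl_cons, hBstep, pvFold_spec, zero_add]
    have hMeq : pvMinOf (PySem.List.enumerate t 1) (pvm x) = M := pvMinOf_enumerate t 1 (pvm x)
    -- pointwise: minimum ∈ nums ↔ pvm nums = minimum, for nums ∈ x :: t
    have hpt : ∀ nums ∈ x :: t, (M ∈ nums) ↔ pvm nums = M := by
      intro nums hmem
      have hne' : nums ≠ [] := hall nums hmem
      obtain ⟨v, hv⟩ : ∃ v, PySem.List.min? nums (fun x => x) = some v := by
        cases hvv : PySem.List.min? nums (fun x => x) with
        | none => exact absurd ((PySem.List.min?_eq_none_iff _ _).mp hvv) hne'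
        | some v => exact ⟨v, rfl⟩
      have hpv : pvm nums = v := by simp [pvm, hv]
      have hvmem : v ∈ nums := PySem.List.min?_mem hv
      have hvmin : ∀ y ∈ nums, v ≤ y := PySem.List.min?_isMin hv
      have hMle : M ≤ pvm nums := by
        have h1 : pvm nums ∈ pvm x :: t.map pvm := by
          simpa using List.mem_map_of_mem (f := pvm) hmem
        have := PySem.List.min?_isMin (key := fun x => x) hmin (pvm nums) h1
        simpa using this
      constructor
      · intro hMin
        have := hvmin M hMin
        omega
      · intro hpe
        rw [← hpe, hpv]; exact hvmem
    -- rewrite A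
    have hA : find_lists_with_minimum_value (x :: t)
        = (PySem.List.enumerate (x :: t) 0).filterMap
            (fun p => if M ∈ p.2 then some p.1 else none) := by
      simp only [find_lists_with_minimum_value, List.map_cons, hmin]
      simp
    rw [hA, hB, hMeq]
    have hsnd : ∀ p ∈ PySem.List.enumerate (x :: t) 0, p.2 ∈ x :: t := by
      intro p hp
      obtain ⟨k, hk, rfl⟩ := (PySem.List.mem_enumerate_iff _ _ _).mp hp
      exact List.getElem_mem hk
    have hcongr : (PySem.List.enumerate (x :: t) 0).filterMap
          (fun p => if M ∈ p.2 then some p.1 else none)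
        = (PySem.List.enumerate (x :: t) 0).filterMap
          (fun p => if pvm p.2 = M then some p.1 else none) := by
      apply List.filterMap_congr
      intro p hp
      by_cases hc : M ∈ p.2
      · simp [hc, (hpt p.2 (hsnd p hp)).mp hc]
      · have h2 : ¬ pvm p.2 = M := fun h => hc ((hpt p.2 (hsnd p hp)).mpr h)
        simp [hc, h2]
    rw [hcongr]
    simp only [PySem.List.enumerate_cons, List.filterMap_cons]
    have hle : pvMinOf (PySem.List.enumerate t 1) (pvm x) ≤ pvm x := pvMinOf_le _ _
    rw [hMeq] at hle
    by_cases h2 : pvm x = M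
    · simp [h2]
    · simp [h2, show M < pvm x by omega]
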